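-- pv_equiv track=rewrite | github.com/ensia96/algorithm | baekjoon/baaarkingdog/0x0D/어항 정리(23291).py | fold_fishbowl_array
-- ===== SOURCE A (Python) =====
-- def fold_fishbowl_array(L, d=0):
--     if type(L[0]) != list:
--         L = [L]
--     n = len(L[0])//2
--     if d == 2:
--         return L
--     t = []
--     for l in L[::-1]:
--         t += [l[:n][::-1]]
--     for l in L:
--         t += [l[n:]]
--     return fold_fishbowl_array(t, d+1)
-- ===== SOURCE B (Python) =====
-- def fold_fishbowl_array(L, d=0):
--     if type(L[0]) != list:
--         L = [L]
--     while d != 2: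
--         n = len(L[0]) // 2
--         L = [r[:n][::-1] for r in reversed(L)] + [r[n:] for r in L]
--         d += 1
--     return L
-- ===== Notes on version B (the rewrite author's own statement) =====
-- stated objective: simpler
-- what changed: replaces A's tail recursion and accumulator loops (t += [...]) with a single while-loop whose body rebuilds the grid in one expression from two comprehensions
import Mathlib
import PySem

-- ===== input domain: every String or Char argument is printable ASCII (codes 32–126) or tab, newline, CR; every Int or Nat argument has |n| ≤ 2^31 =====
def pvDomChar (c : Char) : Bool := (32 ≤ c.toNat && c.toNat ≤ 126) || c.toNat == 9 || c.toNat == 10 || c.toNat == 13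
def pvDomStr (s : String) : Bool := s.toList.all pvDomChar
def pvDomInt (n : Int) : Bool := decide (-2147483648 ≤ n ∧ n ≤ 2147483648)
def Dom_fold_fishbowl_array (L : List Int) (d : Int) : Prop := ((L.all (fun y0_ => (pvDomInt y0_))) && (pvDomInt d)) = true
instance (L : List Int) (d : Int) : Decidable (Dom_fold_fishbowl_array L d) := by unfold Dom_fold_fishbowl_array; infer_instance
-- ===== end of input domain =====

-- B replaces A's tail recursion and accumulator loops with a single while-loop whose body
-- rebuilds the grid from two list comprehensions; same cost, plainer shape.


-- ===== PORT A =====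
-- A recurses with d increasing until d == 2; on Pre_ (d ≤ 2) that is (2-d).toNat calls,
-- used here as the structural fuel.  l[:n][::-1] = (take n).reverse and l[n:] = drop n are
-- exact since n = len//2 ≥ 0; L[::-1] = L.reverse; L[0] = headD (L nonempty throughout,
-- since the input row is wrapped once and each fold doubles the row count).
def foldA_go : Nat → List (List Int) → List (List Int)
  | 0, M => M
  | fuel+1, M =>
    let n : Nat := (M.headD []).length / 2
    let t : List (List Int) := M.reverse.foldl (fun t l => t ++ [(l.take n).reverse]) []
    let t := M.foldl (fun t l => t ++ [l.drop n]) t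
    foldA_go fuel t

def fold_fishbowl_array (L : List Int) (d : Int) : List (List Int) :=
  foldA_go (2 - d).toNat [L]

-- ===== PORT B =====
-- one iteration of B's while-loop body: the two comprehensions joined by +
def altStep (M : List (List Int)) : List (List Int) :=
  let n : Nat := (M.headD []).length / 2
  (M.reverse.map (fun r => (r.take n).reverse)) ++ (M.map (fun r => r.drop n))

-- 'while d != 2: …; d += 1' runs once per d ∈ range(d, 2) on the admitted inputs (d ≤ 2)
def fold_fishbowl_array_alt (L : List Int) (d : Int) : List (List Int) :=
  (PySem.List.pyRange d 2 1).foldl (fun M _ => altStep M) [L]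

-- ===== PRECONDITION & SPEC =====
-- Pre_ excludes the empty list, on which A raises IndexError indexing its first element,
-- and depths past the stopping value, on which A recurses forever (ending in
-- RecursionError); B raises / loops forever on the same inputs.
def Pre_fold_fishbowl_array (L : List Int) (d : Int) : Prop := L ≠ [] ∧ d ≤ 2
instance (L : List Int) (d : Int) : Decidable (Pre_fold_fishbowl_array L d) := by
  unfold Pre_fold_fishbowl_array; infer_instance
def pvWitness_fold_fishbowl_array : List Int × Int := ([1, 2, 3, 4, 5], 0)

def Spec_fold_fishbowl_array (L : List Int) (d : Int) (out : List (List Int)) : Prop := out = fold_fishbowl_array_alt L d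
instance (L : List Int) (d : Int) (out : List (List Int)) : Decidable (Spec_fold_fishbowl_array L d out) := by unfold Spec_fold_fishbowl_array; infer_instance

-- ===== CLAIM (what is proved, stated in full; the proofs are below) =====
def Claim_equal_fold_fishbowl_array : Prop := ∀ (L : List Int) (d : Int), Dom_fold_fishbowl_array L d → Pre_fold_fishbowl_array L d → Spec_fold_fishbowl_array L d (fold_fishbowl_array L d)

-- ===== LEMMAS AND PROOFS =====
lemma foldl_push_eq_map (f : List Int → List Int) :
    ∀ (M : List (List Int)) (acc : List (List Int)),
      M.foldl (fun t l => t ++ [f l]) acc = acc ++ M.map f := by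
  intro M
  induction M with
  | nil => simp
  | cons x xs ih => intro acc; simp [List.foldl, ih]

lemma foldl_range_eq_go :
    ∀ (r : List Int) (M : List (List Int)),
      r.foldl (fun M _ => altStep M) M = foldA_go r.length M := by
  intro r
  induction r with
  | nil => intro M; rfl
  | cons x xs ih =>
      intro M
      simp only [List.foldl, List.length_cons, foldA_go]
      rw [ih]
      congr 1
      rw [foldl_push_eq_map, foldl_push_eq_map]
      simp [altStep]

-- ===== VERDICT (by name: the statement is the Claim_ definition above) =====
theorem fold_fishbowl_array_spec : Claim_equal_fold_fishbowl_array := by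
  intro L d _ _
  unfold Spec_fold_fishbowl_array fold_fishbowl_array fold_fishbowl_array_alt
  rw [foldl_range_eq_go, PySem.List.length_pyRange_one]
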